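-- pv_equiv track=rewrite | github.com/NataliaCarvalhinha/python-studies | Algorithms and Data Structures/ComplexidadeDeAlgoritmos/NumerosPrimos/numerosPrimos.py | antecessores
-- ===== SOURCE A (Python) =====
-- def primo(n):
-- 	if n == 1:
-- 		return False
-- 	if (n == 2) or (n == 3):
-- 		return True
-- 	if (n % 2 == 0) or (n % 3 == 0):
-- 		return False
-- 	i = 5
-- 	while i*i <= n:
-- 		if (n % i == 0) or (n % (i+2) == 0):
-- 			return False
-- 		i += 6
-- 	return True
--
-- def antecessores(n):
-- 	n -= 1
-- 	primos = []
-- 	while len(primos) < 2 and n > 1: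
-- 		if primo(n):
-- 			primos.append(n)
-- 		n -= 1
-- 	return primos
-- ===== SOURCE B (Python) =====
-- def antecessores(n):
--     limit = n - 1  # candidates are 2..limit
--     if limit < 2:
--         return []
--     # r = isqrt(limit)
--     r = 1
--     while (r + 1) * (r + 1) <= limit:
--         r += 1
--     # base sieve: primes up to r
--     base = [True] * (r + 1)
--     base[0] = False
--     base[1] = False
--     p = 2
--     while p * p <= r:
--         if base[p]:
--             for q in range(p * p, r + 1, p):
--                 base[q] = False
--         p += 1
--     primes = [i for i in range(2, r + 1) if base[i]]
--     # scan fixed-size windows downward from limit until two primes are found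
--     res = []
--     hi = limit
--     while hi >= 2 and len(res) < 2:
--         lo = max(2, hi - 65536 + 1)
--         flags = [True] * (hi - lo + 1)
--         for p in primes:
--             start = max(p * p, ((lo + p - 1) // p) * p)
--             for q in range(start, hi + 1, p):
--                 flags[q - lo] = False
--         for i in reversed(range(lo, hi + 1)):
--             if flags[i - lo]:
--                 res.append(i)
--                 if len(res) == 2:
--                     break
--         hi = lo - 1
--     return res
-- ===== Notes on version B (the rewrite author's own statement) =====
-- stated objective: alternative
-- what changed: Replaces the countdown loop that trial-divides each candidate with a 6k±1 wheel by a segmented Sieve of Eratosthenes: base primes up to isqrt(n-1) are sieved once, then fixed-size windows below n are sieved downward and the first two unmarked indices are returned.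
import Mathlib
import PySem

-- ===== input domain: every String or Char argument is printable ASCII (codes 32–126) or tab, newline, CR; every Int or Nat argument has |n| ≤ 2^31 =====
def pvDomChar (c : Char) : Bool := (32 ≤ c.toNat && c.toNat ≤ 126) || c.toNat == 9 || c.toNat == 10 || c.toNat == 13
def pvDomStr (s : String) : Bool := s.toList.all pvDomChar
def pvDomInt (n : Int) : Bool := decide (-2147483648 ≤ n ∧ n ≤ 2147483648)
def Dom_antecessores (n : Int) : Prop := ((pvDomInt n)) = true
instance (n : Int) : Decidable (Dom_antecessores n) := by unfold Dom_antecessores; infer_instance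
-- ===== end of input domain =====

-- B replaces A's countdown with per-candidate 6k±1 trial division by a segmented Sieve of
-- Eratosthenes: base primes up to isqrt(n-1), then descending windows below n are sieved and
-- their unmarked indices collected largest-first (objective: alternative algorithm).

-- ===== PORT A =====

-- the 'while i*i <= n' wheel loop of primo (i starts at 5, steps by 6)
def primoWheel (n i : Int) : Bool :=
  if h : i * i ≤ n then
    if PySem.Int.mod n i == 0 || PySem.Int.mod n (i + 2) == 0 then false
    else primoWheel n (i + 6)
  else true
termination_by (n + 7 - i).toNat
decreasing_by
  have hi : i ≤ n := by nlinarith [mul_self_nonneg i, mul_self_nonneg (i - 1)]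
  omega

def primo (m : Int) : Bool :=
  if m == 1 then false
  else if m == 2 || m == 3 then true
  else if PySem.Int.mod m 2 == 0 || PySem.Int.mod m 3 == 0 then false
  else primoWheel m 5

-- the 'while len(primos) < 2 and n > 1' collection loop of antecessores
def loopA (n : Int) (primos : List Int) : List Int :=
  if primos.length < 2 ∧ 1 < n then
    loopA (n - 1) (if primo n then primos ++ [n] else primos)
  else primos
termination_by (n - 1).toNat
decreasing_by omega

def antecessores (n : Int) : List Int := loopA (n - 1) []

-- ===== PORT B =====

-- flags[i] for an int index that is ≥ 0 and in range at every use site (exact there)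
def getFlag (flags : Array Bool) (i : Int) : Bool := flags.getD i.toNat false

-- the 'while (r+1)*(r+1) <= limit: r += 1' loop computing isqrt(limit)
def isqrtLoop (limit r : Int) : Int :=
  if h : (r + 1) * (r + 1) ≤ limit then isqrtLoop limit (r + 1) else r
termination_by (limit - r).toNat
decreasing_by
  have : r + 1 ≤ limit := by
    by_cases h0 : 0 ≤ r
    · nlinarith
    · nlinarith
  omega

-- 'for q in range(p*p, r+1, p): base[q] = False'  (q ≥ p*p ≥ 4 > 0, so q.toNat is exact)
def markMult (r p : Int) (flags : Array Bool) : Array Bool :=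
  (PySem.List.pyRange (p * p) (r + 1) p).foldl (fun f q => f.setIfInBounds q.toNat false) flags

-- the 'while p*p <= r' base-sieve loop
def sieveLoop (r p : Int) (flags : Array Bool) : Array Bool :=
  if h : p * p ≤ r then
    sieveLoop r (p + 1) (if getFlag flags p then markMult r p flags else flags)
  else flags
termination_by (r + 1 - p).toNat
decreasing_by
  have hp : p ≤ r := by nlinarith [mul_self_nonneg p, mul_self_nonneg (p - 1)]
  omega

-- base = [True]*(r+1); base[0] = base[1] = False; sieve; [i for i in range(2, r+1) if base[i]]
def basePrimes (r : Int) : List Int :=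
  let base := sieveLoop r 2
    (((Array.replicate (r + 1).toNat true).setIfInBounds 0 false).setIfInBounds 1 false)
  (PySem.List.pyRange 2 (r + 1) 1).filter (fun i => getFlag base i)

-- 'start = max(p*p, ((lo+p-1)//p)*p); for q in range(start, hi+1, p): flags[q-lo] = False'
def markWinP (lo hi : Int) (flags : Array Bool) (p : Int) : Array Bool :=
  (PySem.List.pyRange (max (p * p) (PySem.Int.floordiv (lo + p - 1) p * p)) (hi + 1) p).foldl
    (fun f q => f.setIfInBounds (q - lo).toNat false) flags

-- '[True]*(hi-lo+1)' followed by the 'for p in primes' marking loop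
def winFlags (lo hi : Int) (primes : List Int) : Array Bool :=
  primes.foldl (markWinP lo hi) (Array.replicate (hi - lo + 1).toNat true)

-- 'for i in reversed(range(lo, hi+1)): if flags[i-lo]: res.append(i); if len(res)==2: break'
def collectWin (lo : Int) (flags : Array Bool) (xs res : List Int) : List Int :=
  match xs with
  | [] => res
  | i :: rest =>
    if getFlag flags (i - lo) then
      if (res ++ [i]).length = 2 then res ++ [i]
      else collectWin lo flags rest (res ++ [i])
    else collectWin lo flags rest res

-- the 'while hi >= 2 and len(res) < 2' window loop (window size 65536); 'hi = lo - 1' at the end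
def outerLoop (primes : List Int) (hi : Int) (res : List Int) : List Int :=
  if 2 ≤ hi ∧ res.length < 2 then
    let lo := max 2 (hi - 65536 + 1)
    outerLoop primes (lo - 1)
      (collectWin lo (winFlags lo hi primes) (PySem.List.pyRange lo (hi + 1) 1).reverse res)
  else res
termination_by (hi - 1).toNat
decreasing_by omega

def antecessores_alt (n : Int) : List Int :=
  let limit := n - 1
  if limit < 2 then []
  else outerLoop (basePrimes (isqrtLoop limit 1)) limit []

-- ===== PRECONDITION & SPEC =====
def Spec_antecessores (n : Int) (out : List Int) : Prop := out = antecessores_alt n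
instance (n : Int) (out : List Int) : Decidable (Spec_antecessores n out) := by unfold Spec_antecessores; infer_instance

-- ===== CLAIM (what is proved, stated in full; the proofs are below) =====
def Claim_equal_antecessores : Prop := ∀ (n : Int), Dom_antecessores n → Spec_antecessores n (antecessores n)

-- ===== LEMMAS AND PROOFS =====

-- 'm has a divisor d with 2 ≤ d and d*d ≤ m' — the common characterisation both sides reduce to
def HasSmallDiv (m : Int) : Prop := ∃ d : Int, 2 ≤ d ∧ d * d ≤ m ∧ d ∣ m

-- wheel soundness: a False answer exhibits a small divisor
theorem primoWheel_false_hasSmallDiv (n i : Int) (hi : 5 ≤ i)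
    (hw : primoWheel n i = false) : HasSmallDiv n := by
  suffices H : ∀ (k : Nat) (i : Int), (n + 7 - i).toNat ≤ k → 5 ≤ i →
      primoWheel n i = false → HasSmallDiv n by
    exact H (n + 7 - i).toNat i le_rfl hi hw
  clear hw hi
  intro k
  induction k with
  | zero =>
    intro i hk hi hw
    have hnot : ¬ i * i ≤ n := by
      intro hle
      have : i ≤ n := by nlinarith
      omega
    rw [primoWheel, dif_neg hnot] at hw
    exact absurd hw (by simp)
  | succ k ih =>
    intro i hk hi hw
    by_cases hle : i * i ≤ n
    · have hin : i ≤ n := by nlinarith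
      rw [primoWheel, dif_pos hle] at hw
      rcases hcond : (PySem.Int.mod n i == 0 || PySem.Int.mod n (i + 2) == 0) with _ | _
      · rw [if_neg (by simp [hcond])] at hw
        exact ih (i + 6) (by omega) (by omega) hw
      · have hcond' := hcond
        simp only [Bool.or_eq_true, beq_iff_eq, PySem.Int.mod_eq_zero_iff_dvd] at hcond'
        rcases hcond' with hdvd | hdvd
        · exact ⟨i, by omega, hle, hdvd⟩
        · by_cases h2 : (i + 2) * (i + 2) ≤ n
          · exact ⟨i + 2, by omega, h2, hdvd⟩
          · obtain ⟨c, hc⟩ := hdvd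
            have hc2 : 2 ≤ c := by nlinarith
            have hclt : c < i + 2 := by nlinarith
            refine ⟨c, hc2, by nlinarith, ⟨i + 2, by rw [hc, mul_comm]⟩⟩
    · rw [primoWheel, dif_neg hle] at hw
      exact absurd hw (by simp)

-- wheel completeness: a small divisor ≡ 1 or 5 (mod 6) at or above i forces False
theorem primoWheel_false_of_div (n i : Int) (hi6 : i % 6 = 5) (hi : 5 ≤ i)
    (hj : ∃ j : Int, i ≤ j ∧ j * j ≤ n ∧ j ∣ n ∧ (j % 6 = 5 ∨ j % 6 = 1)) :
    primoWheel n i = false := by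
  suffices H : ∀ (k : Nat) (i : Int), (n + 7 - i).toNat ≤ k → i % 6 = 5 → 5 ≤ i →
      (∃ j : Int, i ≤ j ∧ j * j ≤ n ∧ j ∣ n ∧ (j % 6 = 5 ∨ j % 6 = 1)) →
      primoWheel n i = false by
    exact H (n + 7 - i).toNat i le_rfl hi6 hi hj
  clear hi6 hi hj
  intro k
  induction k with
  | zero =>
    intro i hk hi6 hi hj
    obtain ⟨j, hij, hjj, _, _⟩ := hj
    have : i * i ≤ n := by nlinarith
    have : i ≤ n := by nlinarith
    omega
  | succ k ih =>
    intro i hk hi6 hi hj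
    obtain ⟨j, hij, hjj, hjd, hj6⟩ := hj
    have hle : i * i ≤ n := by nlinarith
    have hin : i ≤ n := by nlinarith
    rw [primoWheel, dif_pos hle]
    by_cases hnear : j ≤ i + 2
    · have : j = i ∨ j = i + 2 := by omega
      rcases this with rfl | rfl
      · rw [if_pos (by simp [PySem.Int.mod_eq_zero_iff_dvd, hjd])]
      · rw [if_pos (by simp [PySem.Int.mod_eq_zero_iff_dvd, hjd])]
    · have hfar : i + 6 ≤ j := by omega
      rcases hcond : (PySem.Int.mod n i == 0 || PySem.Int.mod n (i + 2) == 0) with _ | _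
      · rw [if_neg (by simp)]
        exact ih (i + 6) (by omega) (by omega) (by omega) ⟨j, hfar, hjj, hjd, hj6⟩
      · rw [if_pos rfl]

theorem primo_iff (m : Int) (hm : 2 ≤ m) : primo m = true ↔ ¬ HasSmallDiv m := by
  rw [primo]
  split_ifs with h1 h23 h235
  · simp only [beq_iff_eq] at h1; omega
  · simp only [Bool.or_eq_true, beq_iff_eq] at h23
    refine iff_of_true rfl ?_
    rintro ⟨d, hd2, hdd, -⟩
    rcases h23 with rfl | rfl <;> nlinarith
  · simp only [Bool.or_eq_true, beq_iff_eq] at h23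
    push Not at h23
    simp only [Bool.or_eq_true, beq_iff_eq, PySem.Int.mod_eq_zero_iff_dvd] at h235
    refine iff_of_false (by simp) ?_
    rw [not_not]
    by_cases h2' : (2:Int) ∣ m
    · exact ⟨2, by norm_num, by omega, h2'⟩
    · rcases h235 with h2 | h3
      · exact absurd h2 h2'
      · exact ⟨3, by norm_num, by omega, h3⟩
  · simp only [Bool.or_eq_true, beq_iff_eq] at h23
    push Not at h23
    simp only [Bool.or_eq_true, beq_iff_eq, PySem.Int.mod_eq_zero_iff_dvd] at h235
    push Not at h235
    obtain ⟨hm2, hm3⟩ := h235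
    have hm5 : 5 ≤ m := by omega
    constructor
    · intro hw hsd
      obtain ⟨d, hd2, hdd, hdvd⟩ := hsd
      have hnd2 : ¬ (2:Int) ∣ d := fun h => hm2 (h.trans hdvd)
      have hnd3 : ¬ (3:Int) ∣ d := fun h => hm3 (h.trans hdvd)
      have hw' := primoWheel_false_of_div m 5 (by norm_num) (by norm_num)
        ⟨d, by omega, hdd, hdvd, by omega⟩
      rw [hw] at hw'
      exact absurd hw' (by simp)
    · intro hn
      by_contra hne
      have hwf : primoWheel m 5 = false := by
        cases hwb : primoWheel m 5
        · rfl
        · exact absurd hwb hne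
      exact hn (primoWheel_false_hasSmallDiv m 5 (by norm_num) hwf)

-- the integers n, n-1, …, 2 (empty when n ≤ 1): the candidate order of A's countdown
def descL (n : Int) : List Int := if 1 < n then n :: descL (n - 1) else []
termination_by (n - 1).toNat
decreasing_by omega

theorem descL_eq_reverse_pyRange (n : Int) :
    descL n = (PySem.List.pyRange 2 (n + 1) 1).reverse := by
  suffices H : ∀ (k : Nat) (n : Int), (n - 1).toNat ≤ k →
      descL n = (PySem.List.pyRange 2 (n + 1) 1).reverse by
    exact H (n - 1).toNat n le_rfl
  intro k
  induction k with
  | zero =>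
    intro n hk
    rw [descL, if_neg (by omega), PySem.List.pyRange_one_eq_nil (by omega)]
    rfl
  | succ k ih =>
    intro n hk
    by_cases hn : 1 < n
    · rw [descL, if_pos hn, PySem.List.pyRange_one_succ_right (by omega),
        List.reverse_append, ih (n - 1) (by omega)]
      norm_num
    · rw [descL, if_neg hn, PySem.List.pyRange_one_eq_nil (by omega)]
      rfl

theorem loopA_eq (n : Int) (primos : List Int) (h : primos.length ≤ 2) :
    loopA n primos = (primos ++ (descL n).filter primo).take 2 := by
  suffices H : ∀ (k : Nat) (n : Int) (primos : List Int), (n - 1).toNat ≤ k →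
      primos.length ≤ 2 → loopA n primos = (primos ++ (descL n).filter primo).take 2 by
    exact H (n - 1).toNat n primos le_rfl h
  clear h
  intro k
  induction k with
  | zero =>
    intro n primos hk h
    rw [loopA, if_neg (by omega), descL, if_neg (by omega)]
    simp [List.take_of_length_le h]
  | succ k ih =>
    intro n primos hk h
    rw [loopA]
    by_cases hc : primos.length < 2 ∧ 1 < n
    · rw [if_pos hc, descL, if_pos hc.2]
      by_cases hpn : primo n
      · rw [if_pos hpn, ih (n - 1) (primos ++ [n]) (by omega) (by simp; omega),
          List.filter_cons_of_pos hpn]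
        simp
      · rw [if_neg hpn, ih (n - 1) primos (by omega) h,
          List.filter_cons_of_neg hpn]
    · rw [if_neg hc]
      rcases not_and_or.mp hc with hlen | hn
      · have h2 : primos.length = 2 := by omega
        rw [List.take_append, h2]
        simp [List.take_of_length_le (le_of_eq h2)]
      · rw [descL, if_neg hn]
        simp [List.take_of_length_le h]

-- generic: folding set-false over a list of in-range nonnegative indices
theorem foldl_set_length (L : List Int) (flags : Array Bool) :
    (L.foldl (fun f q => f.setIfInBounds q.toNat false) flags).size = flags.size := by
  induction L generalizing flags with
  | nil => rfl
  | cons q L ih => simp [List.foldl, ih, Array.size_setIfInBounds]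

theorem foldl_set_getFlag (L : List Int) (flags : Array Bool) (i : Int) (hi : 0 ≤ i)
    (hL : ∀ q ∈ L, 0 ≤ q ∧ q.toNat < flags.size) :
    getFlag (L.foldl (fun f q => f.setIfInBounds q.toNat false) flags) i =
      if i ∈ L then false else getFlag flags i := by
  induction L generalizing flags with
  | nil => simp [List.foldl]
  | cons q L ih =>
    obtain ⟨hq0, hqlt⟩ := hL q (by simp)
    have hstep : getFlag (flags.setIfInBounds q.toNat false) i =
        if i = q then false else getFlag flags i := by
      unfold getFlag
      rcases eq_or_ne i q with rfl | hne
      · simp [Array.getD_eq_getD_getElem?, hqlt]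
      · have : q.toNat ≠ i.toNat := by omega
        simp [Array.getD_eq_getD_getElem?, this, hne]
    rw [List.foldl_cons, ih (flags.setIfInBounds q.toNat false) (by
      intro x hx
      have := hL x (by simp [hx])
      simpa [Array.size_setIfInBounds] using this), hstep]
    by_cases hiq : i = q <;> by_cases hiL : i ∈ L <;> simp [hiq, hiL]

theorem markMult_getFlag (limit p : Int) (flags : Array Bool) (i : Int)
    (hp : 0 < p) (hlen : flags.size = (limit + 1).toNat) (hi : 0 ≤ i) (hil : i ≤ limit) :
    getFlag (markMult limit p flags) i =
      if p * p ≤ i ∧ p ∣ i then false else getFlag flags i := by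
  unfold markMult
  rw [foldl_set_getFlag _ _ _ hi]
  · have hmem : i ∈ PySem.List.pyRange (p * p) (limit + 1) p ↔ p * p ≤ i ∧ p ∣ i := by
      rw [PySem.List.mem_pyRange_iff_of_pos hp]
      constructor
      · rintro ⟨h1, _, h3⟩
        exact ⟨h1, by have := dvd_add h3 (dvd_mul_left p p); simpa using this⟩
      · rintro ⟨h1, h2⟩
        exact ⟨h1, by omega, dvd_sub h2 (dvd_mul_left p p)⟩
    by_cases hc : p * p ≤ i ∧ p ∣ i <;> simp [hmem, hc]
  · intro q hq
    rw [PySem.List.mem_pyRange_iff_of_pos hp] at hq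
    constructor
    · nlinarith [hq.1]
    · omega

-- invariant after all marking passes d < p: exactly the i with a witnessed divisor below p are cleared
def SieveInv (limit p : Int) (flags : Array Bool) : Prop :=
  ∀ i : Int, 2 ≤ i → i ≤ limit →
    (getFlag flags i = false ↔ ∃ d : Int, 2 ≤ d ∧ d < p ∧ d ∣ i ∧ d * d ≤ i)

theorem sieveLoop_correct (limit : Int) (p : Int) (flags : Array Bool) (hp : 2 ≤ p)
    (hlen : flags.size = (limit + 1).toNat) (hinv : SieveInv limit p flags) :
    ∀ i : Int, 2 ≤ i → i ≤ limit →
      (getFlag (sieveLoop limit p flags) i = false ↔ HasSmallDiv i) := by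
  suffices H : ∀ (k : Nat) (p : Int) (flags : Array Bool), (limit + 1 - p).toNat ≤ k → 2 ≤ p →
      flags.size = (limit + 1).toNat → SieveInv limit p flags →
      ∀ i : Int, 2 ≤ i → i ≤ limit →
        (getFlag (sieveLoop limit p flags) i = false ↔ HasSmallDiv i) by
    exact H (limit + 1 - p).toNat p flags le_rfl hp hlen hinv
  intro k
  induction k with
  | zero =>
    intro p flags hk hp hlen hinv i hi2 hil
    have hnot : ¬ p * p ≤ limit := by
      intro hle
      have : p ≤ limit := by nlinarith
      omega
    rw [sieveLoop, dif_neg hnot, hinv i hi2 hil]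
    constructor
    · rintro ⟨d, h2, _, hdvd, hdd⟩; exact ⟨d, h2, hdd, hdvd⟩
    · rintro ⟨d, h2, hdd, hdvd⟩
      refine ⟨d, h2, ?_, hdvd, hdd⟩
      nlinarith
  | succ k ih =>
    intro p flags hk hp hlen hinv i hi2 hil
    by_cases hle : p * p ≤ limit
    · have hple : p ≤ limit := by nlinarith
      rw [sieveLoop, dif_pos hle]
      by_cases hfp : getFlag flags p = true
      · rw [if_pos hfp]
        refine ih (p + 1) _ (by omega) (by omega) ?_ ?_ i hi2 hil
        · unfold markMult; rw [foldl_set_length]; exact hlen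
        · intro j hj2 hjl
          rw [markMult_getFlag limit p flags j (by omega) hlen (by omega) hjl]
          split_ifs with hc
          · simp only [true_iff]
            exact ⟨p, hp, by omega, hc.2, hc.1⟩
          · rw [hinv j hj2 hjl]
            constructor
            · rintro ⟨d, h2, hlt, hd, hdd⟩; exact ⟨d, h2, by omega, hd, hdd⟩
            · rintro ⟨d, h2, hlt, hd, hdd⟩
              rcases lt_or_eq_of_le (by omega : d ≤ p) with h | rfl
              · exact ⟨d, h2, h, hd, hdd⟩
              · exact absurd ⟨hdd, hd⟩ hc
      · rw [if_neg hfp]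
        obtain ⟨d0, hd02, hd0lt, hd0dvd, hd0dd⟩ :=
          (hinv p hp hple).mp (by simpa using hfp)
        refine ih (p + 1) flags (by omega) (by omega) hlen ?_ i hi2 hil
        intro j hj2 hjl
        rw [hinv j hj2 hjl]
        constructor
        · rintro ⟨d, h2, hlt, hd, hdd⟩; exact ⟨d, h2, by omega, hd, hdd⟩
        · rintro ⟨d, h2, hlt, hd, hdd⟩
          rcases lt_or_eq_of_le (by omega : d ≤ p) with h | rfl
          · exact ⟨d, h2, h, hd, hdd⟩
          · exact ⟨d0, hd02, hd0lt, dvd_trans hd0dvd hd, by nlinarith⟩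
    · rw [sieveLoop, dif_neg hle, hinv i hi2 hil]
      constructor
      · rintro ⟨d, h2, _, hdvd, hdd⟩; exact ⟨d, h2, hdd, hdvd⟩
      · rintro ⟨d, h2, hdd, hdvd⟩
        refine ⟨d, h2, ?_, hdvd, hdd⟩
        nlinarith


theorem flags0_inv (r : Int) :
    SieveInv r 2 (((Array.replicate (r + 1).toNat true).setIfInBounds 0 false).setIfInBounds 1 false) := by
  intro j hj2 hjl
  have hjt : 2 ≤ j.toNat ∧ j.toNat < (r + 1).toNat := by omega
  constructor
  · intro hfalse
    rw [getFlag, Array.getD_eq_getD_getElem?] at hfalse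
    rw [Array.getElem?_setIfInBounds, if_neg (by omega), Array.getElem?_setIfInBounds, if_neg (by omega),
      Array.getElem?_replicate, if_pos (by omega : j.toNat < (r+1).toNat)] at hfalse
    simp at hfalse
  · rintro ⟨d, hd2, hdlt, -, -⟩
    omega

theorem isqrtLoop_spec (limit : Int) : ∀ (r : Int),
    r ≤ isqrtLoop limit r ∧ limit < (isqrtLoop limit r + 1) * (isqrtLoop limit r + 1) := by
  suffices H : ∀ (k : Nat) (r : Int), (limit - r).toNat ≤ k →
      r ≤ isqrtLoop limit r ∧ limit < (isqrtLoop limit r + 1) * (isqrtLoop limit r + 1) by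
    intro r
    exact H (limit - r).toNat r le_rfl
  intro k
  induction k with
  | zero =>
    intro r hk
    have hnot : ¬ (r + 1) * (r + 1) ≤ limit := by
      intro hle
      have : r + 1 ≤ limit := by
        by_cases h0 : 0 ≤ r
        · nlinarith
        · nlinarith
      omega
    rw [isqrtLoop, dif_neg hnot]
    omega
  | succ k ih =>
    intro r hk
    by_cases hle : (r + 1) * (r + 1) ≤ limit
    · have hrl : r + 1 ≤ limit := by
        by_cases h0 : 0 ≤ r
        · nlinarith
        · nlinarith
      rw [isqrtLoop, dif_pos hle]
      have := ih (r + 1) (by omega)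
      exact ⟨by omega, this.2⟩
    · rw [isqrtLoop, dif_neg hle]
      omega

theorem basePrimes_mem (r p : Int) :
    p ∈ basePrimes r ↔ 2 ≤ p ∧ p ≤ r ∧ ¬ HasSmallDiv p := by
  have hlen : (((Array.replicate (r + 1).toNat true).setIfInBounds 0 false).setIfInBounds 1 false).size
      = (r + 1).toNat := by simp
  rw [basePrimes]
  simp only [List.mem_filter, PySem.List.mem_pyRange_one]
  constructor
  · rintro ⟨⟨hp2, hpr⟩, hflag⟩
    refine ⟨hp2, by omega, ?_⟩
    intro hsd
    have hS := sieveLoop_correct r 2 _ le_rfl hlen (flags0_inv r) p hp2 (by omega)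
    rw [hS.mpr hsd] at hflag
    simp at hflag
  · rintro ⟨hp2, hpr, hnsd⟩
    refine ⟨⟨hp2, by omega⟩, ?_⟩
    have hS := sieveLoop_correct r 2 _ le_rfl hlen (flags0_inv r) p hp2 (by omega)
    cases hgf : getFlag (sieveLoop r 2
        (((Array.replicate (r + 1).toNat true).setIfInBounds 0 false).setIfInBounds 1 false)) p
    · exact absurd (hS.mp hgf) hnsd
    · rfl

theorem exists_min_div (i : Int) (h : HasSmallDiv i) :
    ∃ p : Int, 2 ≤ p ∧ p ∣ i ∧ p * p ≤ i ∧ ¬ HasSmallDiv p := by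
  suffices H : ∀ (k : Nat) (d i : Int), d.toNat ≤ k → 2 ≤ d → d * d ≤ i → d ∣ i →
      ∃ p : Int, 2 ≤ p ∧ p ∣ i ∧ p * p ≤ i ∧ ¬ HasSmallDiv p by
    obtain ⟨d, hd2, hdd, hdvd⟩ := h
    exact H d.toNat d i le_rfl hd2 hdd hdvd
  intro k
  induction k with
  | zero => intro d i hk hd2 _ _; omega
  | succ k ih =>
    intro d i hk hd2 hdd hdvd
    by_cases hsd : HasSmallDiv d
    · obtain ⟨e, he2, hee, hedvd⟩ := hsd
      have helt : e < d := by nlinarith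
      exact ih e i (by omega) he2 (by nlinarith) (hedvd.trans hdvd)
    · exact ⟨d, hd2, hdvd, hdd, hsd⟩

theorem ceil_lb (lo p : Int) (hp : 0 < p) :
    lo ≤ PySem.Int.floordiv (lo + p - 1) p * p := by
  rw [PySem.Int.floordiv_eq_ediv_of_pos hp]
  have h1 := Int.mul_ediv_add_emod (lo + p - 1) p
  have h2 := Int.emod_nonneg (lo + p - 1) (ne_of_gt hp)
  have h3 := Int.emod_lt_of_pos (lo + p - 1) hp
  have hc : p * ((lo + p - 1) / p) = (lo + p - 1) / p * p := mul_comm _ _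
  linarith

theorem ceil_le_of_dvd (lo p i : Int) (hp : 0 < p) (hdvd : p ∣ i) (hlo : lo ≤ i) :
    PySem.Int.floordiv (lo + p - 1) p * p ≤ i := by
  rw [PySem.Int.floordiv_eq_ediv_of_pos hp]
  obtain ⟨m, rfl⟩ := hdvd
  have h1 := Int.mul_ediv_add_emod (lo + p - 1) p
  have h2 := Int.emod_nonneg (lo + p - 1) (ne_of_gt hp)
  have hlt : p * ((lo + p - 1) / p) < p * (m + 1) := by nlinarith
  have hcm : (lo + p - 1) / p ≤ m := by
    have := lt_of_mul_lt_mul_left hlt (le_of_lt hp)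
    omega
  calc (lo + p - 1) / p * p ≤ m * p := by
        exact mul_le_mul_of_nonneg_right hcm (le_of_lt hp)
    _ = p * m := mul_comm _ _

theorem foldl_set_off_length (L : List Int) (off : Int) (flags : Array Bool) :
    (L.foldl (fun f q => f.setIfInBounds (q - off).toNat false) flags).size = flags.size := by
  induction L generalizing flags with
  | nil => rfl
  | cons q L ih => simp [List.foldl, ih, Array.size_setIfInBounds]

theorem foldl_set_off_getFlag (L : List Int) (off : Int) (flags : Array Bool) (i : Int)
    (hoi : off ≤ i)
    (hL : ∀ q ∈ L, off ≤ q ∧ (q - off).toNat < flags.size) :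
    getFlag (L.foldl (fun f q => f.setIfInBounds (q - off).toNat false) flags) (i - off) =
      if i ∈ L then false else getFlag flags (i - off) := by
  induction L generalizing flags with
  | nil => simp [List.foldl]
  | cons q L ih =>
    obtain ⟨hq0, hqlt⟩ := hL q (by simp)
    have hstep : getFlag (flags.setIfInBounds (q - off).toNat false) (i - off) =
        if i = q then false else getFlag flags (i - off) := by
      unfold getFlag
      rcases eq_or_ne i q with rfl | hne
      · simp [Array.getD_eq_getD_getElem?, hqlt]
      · have : (q - off).toNat ≠ (i - off).toNat := by omega
        simp [Array.getD_eq_getD_getElem?, this, hne]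
    rw [List.foldl_cons, ih (flags.setIfInBounds (q - off).toNat false) (by
      intro x hx
      have := hL x (by simp [hx])
      simpa [Array.size_setIfInBounds] using this), hstep]
    by_cases hiq : i = q <;> by_cases hiL : i ∈ L <;> simp [hiq, hiL]

theorem markWinP_getFlag (lo hi p : Int) (flags : Array Bool) (i : Int)
    (hp : 2 ≤ p) (hlen : flags.size = (hi - lo + 1).toNat)
    (h1 : lo ≤ i) (h2 : i ≤ hi) :
    getFlag (markWinP lo hi flags p) (i - lo) =
      if p ∣ i ∧ p * p ≤ i then false else getFlag flags (i - lo) := by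
  have hp0 : (0:Int) < p := by omega
  have hdstart : p ∣ max (p * p) (PySem.Int.floordiv (lo + p - 1) p * p) := by
    rcases max_choice (p * p) (PySem.Int.floordiv (lo + p - 1) p * p) with hmx | hmx <;> rw [hmx]
    · exact dvd_mul_left p p
    · exact Dvd.intro_left _ rfl
  have hstart_lb : lo ≤ max (p * p) (PySem.Int.floordiv (lo + p - 1) p * p) :=
    le_trans (ceil_lb lo p hp0) (le_max_right _ _)
  rw [markWinP, foldl_set_off_getFlag _ lo flags i (by omega) (by
    intro q hq
    rw [PySem.List.mem_pyRange_iff_of_pos hp0] at hq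
    have hql : lo ≤ q := le_trans hstart_lb hq.1
    exact ⟨hql, by rw [hlen]; omega⟩)]
  have hmem : i ∈ PySem.List.pyRange
      (max (p * p) (PySem.Int.floordiv (lo + p - 1) p * p)) (hi + 1) p ↔
      (p ∣ i ∧ p * p ≤ i) := by
    rw [PySem.List.mem_pyRange_iff_of_pos hp0]
    constructor
    · rintro ⟨hs, -, hdv⟩
      have hpi : p ∣ i := by
        have := dvd_add hdv hdstart
        simpa using this
      exact ⟨hpi, le_trans (le_max_left _ _) hs⟩
    · rintro ⟨hpi, hpp⟩
      exact ⟨max_le hpp (ceil_le_of_dvd lo p i hp0 hpi h1), by omega, dvd_sub hpi hdstart⟩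
  by_cases hc : p ∣ i ∧ p * p ≤ i <;> simp [hmem, hc]

theorem winFlags_getFlag (lo hi : Int) (primes : List Int) (i : Int)
    (hps : ∀ p ∈ primes, 2 ≤ p) (h1 : lo ≤ i) (h2 : i ≤ hi) :
    (getFlag (winFlags lo hi primes) (i - lo) = false ↔
      ∃ p ∈ primes, p ∣ i ∧ p * p ≤ i) := by
  suffices H : ∀ (ps : List Int) (flags : Array Bool), (∀ p ∈ ps, 2 ≤ p) →
      flags.size = (hi - lo + 1).toNat →
      (getFlag (ps.foldl (markWinP lo hi) flags) (i - lo) = false ↔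
        (∃ p ∈ ps, p ∣ i ∧ p * p ≤ i) ∨ getFlag flags (i - lo) = false) by
    rw [winFlags, H primes (Array.replicate (hi - lo + 1).toNat true) hps (by simp)]
    have hrep : getFlag (Array.replicate (hi - lo + 1).toNat true) (i - lo) = true := by
      rw [getFlag, Array.getD_eq_getD_getElem?, Array.getElem?_replicate, if_pos (by omega : (i - lo).toNat < (hi - lo + 1).toNat)]
      rfl
    simp [hrep]
  intro ps
  induction ps with
  | nil => intro flags _ _; simp [List.foldl]
  | cons p ps ih =>
    intro flags hps hlen
    rw [List.foldl_cons, ih (markWinP lo hi flags p) (fun x hx => hps x (by simp [hx]))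
      (by rw [markWinP, foldl_set_off_length]; exact hlen),
      markWinP_getFlag lo hi p flags i (hps p (by simp)) hlen h1 h2]
    split_ifs with hc
    · constructor
      · intro _; exact Or.inl ⟨p, by simp, hc⟩
      · intro _; exact Or.inr rfl
    · constructor
      · rintro (⟨x, hx, hxx⟩ | hfl)
        · exact Or.inl ⟨x, by simp [hx], hxx⟩
        · exact Or.inr hfl
      · rintro (⟨x, hx, hxx⟩ | hfl)
        · rcases (by simpa using hx : x = p ∨ x ∈ ps) with rfl | hx'
          · exact absurd hxx hc
          · exact Or.inl ⟨x, hx', hxx⟩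
        · exact Or.inr hfl

theorem win_test (r lo hi limit i : Int) (hr1 : 1 ≤ r) (hrsq : limit < (r + 1) * (r + 1))
    (hlo : 2 ≤ lo) (h1 : lo ≤ i) (h2 : i ≤ hi) (h3 : hi ≤ limit) :
    getFlag (winFlags lo hi (basePrimes r)) (i - lo) = primo i := by
  have hiff := winFlags_getFlag lo hi (basePrimes r) i
    (fun p hp => ((basePrimes_mem r p).mp hp).1) h1 h2
  have hi2 : 2 ≤ i := by omega
  have hP := primo_iff i hi2
  have hQ : (∃ p ∈ basePrimes r, p ∣ i ∧ p * p ≤ i) ↔ HasSmallDiv i := by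
    constructor
    · rintro ⟨p, hp, hpd, hpp⟩
      obtain ⟨hp2, -, -⟩ := (basePrimes_mem r p).mp hp
      exact ⟨p, hp2, hpp, hpd⟩
    · intro hsd
      obtain ⟨p, hp2, hpd, hpp, hnp⟩ := exists_min_div i hsd
      have hpr : p ≤ r := by nlinarith
      exact ⟨p, (basePrimes_mem r p).mpr ⟨hp2, hpr, hnp⟩, hpd, hpp⟩
  cases hgf : getFlag (winFlags lo hi (basePrimes r)) (i - lo)
  · cases hpi : primo i
    · rfl
    · exact absurd (hQ.mp (hiff.mp hgf)) (hP.mp hpi)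
  · cases hpi : primo i
    · have hsd : HasSmallDiv i := by
        by_contra hns
        rw [hpi] at hP
        exact (by simp : ¬ (false = true)) (hP.mpr hns)
      rw [hiff.mpr (hQ.mpr hsd)] at hgf
      exact absurd hgf (by simp)
    · rfl

theorem collectWin_eq (lo : Int) (flags : Array Bool) (g : Int → Bool) :
    ∀ (xs res : List Int), (∀ i ∈ xs, getFlag flags (i - lo) = g i) → res.length < 2 →
    collectWin lo flags xs res = (res ++ xs.filter g).take 2 := by
  intro xs
  induction xs with
  | nil =>
    intro res _ hr
    simp [collectWin, List.take_of_length_le (by omega : res.length ≤ 2)]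
  | cons i rest ih =>
    intro res hmatch hr
    rw [collectWin, hmatch i (by simp)]
    cases hgi : g i
    · rw [if_neg (by simp), List.filter_cons_of_neg (by simp [hgi])]
      exact ih res (fun x hx => hmatch x (by simp [hx])) hr
    · rw [if_pos rfl, List.filter_cons_of_pos hgi]
      by_cases hl2 : (res ++ [i]).length = 2
      · rw [if_pos hl2,
          show res ++ i :: rest.filter g = (res ++ [i]) ++ rest.filter g by simp,
          List.take_append, hl2]
        simp [List.take_of_length_le (le_of_eq hl2)]
      · rw [if_neg hl2, ih (res ++ [i]) (fun x hx => hmatch x (by simp [hx]))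
          (by simp only [List.length_append, List.length_cons, List.length_nil] at hl2 ⊢; omega)]
        simp

theorem take_two_append (l m : List Int) : ((l.take 2) ++ m).take 2 = (l ++ m).take 2 := by
  rw [List.take_append, List.take_append, List.take_take]
  simp [List.length_take]
  congr 1
  omega

theorem descL_split (lo hi : Int) (hl : 2 ≤ lo) (hh : lo ≤ hi + 1) :
    descL hi = (PySem.List.pyRange lo (hi + 1) 1).reverse ++ descL (lo - 1) := by
  rw [descL_eq_reverse_pyRange hi, descL_eq_reverse_pyRange (lo - 1),
    show lo - 1 + 1 = lo by ring,
    PySem.List.pyRange_one_append 2 lo (hi + 1) (by omega) hh, List.reverse_append]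

theorem outerLoop_eq (limit r : Int) (hr1 : 1 ≤ r)
    (hrsq : limit < (r + 1) * (r + 1)) :
    ∀ (hi : Int) (res : List Int), hi ≤ limit → res.length ≤ 2 →
      outerLoop (basePrimes r) hi res = (res ++ (descL hi).filter primo).take 2 := by
  suffices H : ∀ (k : Nat) (hi : Int) (res : List Int), (hi - 1).toNat ≤ k → hi ≤ limit →
      res.length ≤ 2 →
      outerLoop (basePrimes r) hi res = (res ++ (descL hi).filter primo).take 2 by
    intro hi res hh hr
    exact H (hi - 1).toNat hi res le_rfl hh hr
  intro k
  induction k with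
  | zero =>
    intro hi res hk hh hr
    rw [outerLoop, if_neg (by omega), descL, if_neg (by omega)]
    simp [List.take_of_length_le hr]
  | succ k ih =>
    intro hi res hk hh hr
    by_cases hg : 2 ≤ hi ∧ res.length < 2
    · rw [outerLoop, if_pos hg]
      show outerLoop (basePrimes r) (max 2 (hi - 65536 + 1) - 1)
          (collectWin (max 2 (hi - 65536 + 1))
            (winFlags (max 2 (hi - 65536 + 1)) hi (basePrimes r))
            (PySem.List.pyRange (max 2 (hi - 65536 + 1)) (hi + 1) 1).reverse res) = _
      have hlo2 : (2:Int) ≤ max 2 (hi - 65536 + 1) := le_max_left _ _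
      have hlohi : max 2 (hi - 65536 + 1) ≤ hi := by omega
      rw [collectWin_eq (max 2 (hi - 65536 + 1)) _ primo _ res (by
          intro i hi'
          rw [List.mem_reverse, PySem.List.mem_pyRange_one] at hi'
          exact win_test r (max 2 (hi - 65536 + 1)) hi limit i hr1 hrsq hlo2 hi'.1
            (by omega) hh) hg.2,
        ih (max 2 (hi - 65536 + 1) - 1) _ (by omega) (by omega)
          (by simp [List.length_take]),
        take_two_append, List.append_assoc, ← List.filter_append,
        ← descL_split (max 2 (hi - 65536 + 1)) hi hlo2 (by omega)]
    · rw [outerLoop, if_neg hg]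
      rcases not_and_or.mp hg with h2 | hlen
      · rw [descL, if_neg (by omega)]
        simp [List.take_of_length_le hr]
      · have hr2 : res.length = 2 := by omega
        rw [List.take_append, hr2]
        simp [List.take_of_length_le (le_of_eq hr2)]

-- ===== VERDICT (by name: the statement is the Claim_ definition above) =====
theorem antecessores_spec : Claim_equal_antecessores := by
  intro n _
  show antecessores n = antecessores_alt n
  rw [antecessores, loopA_eq (n - 1) [] (by simp), List.nil_append, antecessores_alt]
  show _ = if n - 1 < 2 then [] else outerLoop (basePrimes (isqrtLoop (n - 1) 1)) (n - 1) []
  by_cases hlim : n - 1 < 2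
  · rw [if_pos hlim, descL, if_neg (by omega)]
    rfl
  · rw [if_neg hlim]
    obtain ⟨hr1, hrsq⟩ := isqrtLoop_spec (n - 1) 1
    rw [outerLoop_eq (n - 1) (isqrtLoop (n - 1) 1) hr1 hrsq (n - 1) [] le_rfl (by simp),
      List.nil_append]
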